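-- pv_equiv track=rewrite | github.com/johntsi/preast_qa | general_modules/preprocess_ms_marco.py | get_hashtag_spans
-- ===== SOURCE A (Python) =====
-- def get_hashtag_spans(tokens):
-- 	"""
-- 	Finds the spans (start, end) of subtokes in a list of tokens
--
-- 	Args:
-- 		tokens: list[str]
-- 	Returns:
-- 		spans: list[tuple[int]]
-- 	"""
--
-- 	is_part = ["##" in t for t in tokens]
--
-- 	spans = []
-- 	pos_end = -1
-- 	for pos_start, t in enumerate(is_part):
-- 		if pos_start <= pos_end:
-- 			continue
-- 		if t:
-- 			last_pos = len(is_part[pos_start:]) - 1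
-- 			for j, t_end in enumerate(is_part[pos_start:]):
-- 				if not t_end:
-- 					pos_end = pos_start + j
-- 					break
-- 				if j == last_pos:
-- 					pos_end = pos_start + j + 1
-- 			spans.append((pos_start, pos_end))
--
-- 	return spans
-- ===== SOURCE B (Python) =====
-- def get_hashtag_spans(tokens):
--     is_part = ["##" in t for t in tokens]
--     starts = [i for i, (prev, cur) in enumerate(zip([False] + is_part, is_part))
--               if cur and not prev]
--     ends = [i + 1 for i, (cur, nxt) in enumerate(zip(is_part, is_part[1:] + [False]))
--             if cur and not nxt]
--     return list(zip(starts, ends))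
-- ===== Notes on version B (the rewrite author's own statement) =====
-- stated objective: alternative
-- what changed: A's single stateful scan with an inner lookahead loop and a skip pointer (pos_end) is replaced by stateless boundary detection: a boolean mask, two independent comprehensions finding run starts and run ends by comparing each position with its neighbour, combined with zip.
import Mathlib
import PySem

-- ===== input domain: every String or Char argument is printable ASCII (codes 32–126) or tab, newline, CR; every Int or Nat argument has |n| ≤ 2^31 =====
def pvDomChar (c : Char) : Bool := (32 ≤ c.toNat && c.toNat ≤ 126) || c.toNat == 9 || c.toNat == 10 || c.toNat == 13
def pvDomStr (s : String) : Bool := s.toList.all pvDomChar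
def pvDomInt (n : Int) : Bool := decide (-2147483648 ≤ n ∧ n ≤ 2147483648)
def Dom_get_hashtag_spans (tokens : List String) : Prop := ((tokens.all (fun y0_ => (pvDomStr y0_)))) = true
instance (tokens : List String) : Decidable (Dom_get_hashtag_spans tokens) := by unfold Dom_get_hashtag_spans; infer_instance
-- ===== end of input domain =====

-- B replaces A's stateful scan (inner lookahead loop + skip pointer) by independent
-- start/end boundary detection on the '##' mask plus a zip; same cost, different decomposition.

-- ===== PORT A =====
-- '##' in t
def pvIsPart (t : String) : Bool := PySem.Str.isIn "##" t

-- the inner 'for j, t_end in enumerate(is_part[pos_start:])' loop, returning pos_end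
def pvInnerA : List Bool → Int → Int → Int → Int → Int
  | [], _, _, _, pos_end => pos_end
  | t_end :: rest, pos_start, last_pos, j, pos_end =>
    if !t_end then pos_start + j
    else if j == last_pos then pos_start + j + 1
    else pvInnerA rest pos_start last_pos (j + 1) pos_end

-- the outer 'for pos_start, t in enumerate(is_part)' loop; the list argument is the
-- suffix is_part[pos_start:], so the inner loop runs on it directly
def pvOuterA : List Bool → Int → Int → List (List Int) → List (List Int)
  | [], _, _, spans => spans
  | t :: rest, pos_start, pos_end, spans =>
    if pos_start ≤ pos_end then pvOuterA rest (pos_start + 1) pos_end spans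
    else if t then
      let last_pos : Int := ((t :: rest).length : Int) - 1
      let pe := pvInnerA (t :: rest) pos_start last_pos 0 pos_end
      pvOuterA rest (pos_start + 1) pe (spans ++ [[pos_start, pe]])
    else pvOuterA rest (pos_start + 1) pos_end spans

def get_hashtag_spans (tokens : List String) : List (List Int) :=
  pvOuterA (tokens.map pvIsPart) 0 (-1) []

-- ===== PORT B =====
-- [i for i, (prev, cur) in enumerate(zip([False] + is_part, is_part)) if cur and not prev]
def pvStartsB (is_part : List Bool) : List Int :=
  (PySem.List.enumerate ((false :: is_part).zip is_part)).filterMap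
    (fun p => if p.2.2 && !p.2.1 then some p.1 else none)

-- [i + 1 for i, (cur, nxt) in enumerate(zip(is_part, is_part[1:] + [False])) if cur and not nxt]
def pvEndsB (is_part : List Bool) : List Int :=
  (PySem.List.enumerate (is_part.zip (PySem.List.slice is_part (some 1) none ++ [false]))).filterMap
    (fun p => if p.2.1 && !p.2.2 then some (p.1 + 1) else none)

def get_hashtag_spans_alt (tokens : List String) : List (List Int) :=
  let is_part := tokens.map pvIsPart
  ((pvStartsB is_part).zip (pvEndsB is_part)).map (fun p => [p.1, p.2])

-- ===== PRECONDITION & SPEC =====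
def Spec_get_hashtag_spans (tokens : List String) (out : List (List Int)) : Prop := out = get_hashtag_spans_alt tokens
instance (tokens : List String) (out : List (List Int)) : Decidable (Spec_get_hashtag_spans tokens out) := by unfold Spec_get_hashtag_spans; infer_instance

-- ===== CLAIM (what is proved, stated in full; the proofs are below) =====
def Claim_equal_get_hashtag_spans : Prop := ∀ (tokens : List String), Dom_get_hashtag_spans tokens → Spec_get_hashtag_spans tokens (get_hashtag_spans tokens)

-- ===== LEMMAS AND PROOFS =====

-- canonical maximal-run decomposition of the mask: both ports are proved equal to it
def pvRuns : List Bool → Int → List (Int × Int)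
  | [], _ => []
  | false :: rest, i => pvRuns rest (i + 1)
  | true :: rest, i =>
    let k : Int := 1 + ((rest.takeWhile (fun b => b)).length : Int)
    (i, i + k) :: pvRuns (rest.dropWhile (fun b => b)) (i + k)
termination_by l _ => l.length
decreasing_by
  all_goals simp only [List.length_cons]
  · omega
  · exact Nat.lt_succ_of_le (List.length_dropWhile_le (fun b => b) rest)

-- recursive forms of B's two comprehensions
def pvS : List Bool → Bool → Int → List Int
  | [], _, _ => []
  | c :: r, prev, i => (if c && !prev then [i] else []) ++ pvS r c (i + 1)

def pvE : List Bool → Int → List Int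
  | [], _ => []
  | c :: r, i => (if c && !(r.headD false) then [i + 1] else []) ++ pvE r (i + 1)

lemma pvDropWhile_drop (l : List Bool) :
    l.dropWhile (fun b => b) = l.drop (l.takeWhile (fun b => b)).length := by
  induction l with
  | nil => rfl
  | cons c r ih =>
    by_cases hc : c = true <;> simp [List.dropWhile, List.takeWhile, hc, ih]

lemma pvDropWhile_head (l : List Bool) (b : Bool) (r2 : List Bool)
    (h : l.dropWhile (fun x => x) = b :: r2) : b = false := by
  induction l with
  | nil => simp at h
  | cons c r ih =>
    by_cases hc : c = true
    · exact ih (by simpa [List.dropWhile, hc] using h)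
    · have hcf : c = false := by simpa [Bool.not_eq_true] using hc
      subst hcf
      rw [List.dropWhile_cons_of_neg (by simp)] at h
      injection h with h1 _
      exact h1.symm

lemma pvRuns_nil (i : Int) : pvRuns [] i = [] := by
  simp [pvRuns]

lemma pvRuns_false (r : List Bool) (i : Int) : pvRuns (false :: r) i = pvRuns r (i + 1) := by
  simp [pvRuns]

lemma pvRuns_true (r : List Bool) (i : Int) :
    pvRuns (true :: r) i
      = (i, i + (1 + ((r.takeWhile (fun b => b)).length : Int)))
        :: pvRuns (r.dropWhile (fun b => b)) (i + (1 + ((r.takeWhile (fun b => b)).length : Int))) := by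
  simp [pvRuns]

lemma pvInnerA_eq (l : List Bool) : ∀ (s j pe last : Int), last = j + (l.length : Int) - 1 →
    pvInnerA l s last j pe =
      if l = [] then pe else s + j + ((l.takeWhile (fun b => b)).length : Int) := by
  induction l with
  | nil => intro s j pe last _; simp [pvInnerA]
  | cons t rest ih =>
    intro s j pe last hlast
    by_cases ht : t = true
    · subst ht
      cases rest with
      | nil =>
        have hj : (j == last) = true := by
          simp only [List.length_cons, List.length_nil] at hlast; simp; omega
        simp [pvInnerA, hj, List.takeWhile]
      | cons x r2 =>
        have hj : (j == last) = false := by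
          simp only [List.length_cons] at hlast; simp; omega
        have hrec := ih s (j + 1) pe last
          (by simp only [List.length_cons] at hlast ⊢; omega)
        have hstep : pvInnerA (true :: x :: r2) s last j pe
            = pvInnerA (x :: r2) s last (j + 1) pe := by
          simp [pvInnerA, hj]
        rw [hstep, hrec, if_neg (by simp)]
        have htw : List.takeWhile (fun b => b) (true :: x :: r2)
            = true :: List.takeWhile (fun b => b) (x :: r2) := by simp [List.takeWhile]
        rw [if_neg (by simp : ¬ (true :: x :: r2 : List Bool) = []), htw]
        simp only [List.length_cons]
        push_cast
        ring
    · have ht' : t = false := by simpa [Bool.not_eq_true] using ht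
      subst ht'
      simp [pvInnerA, List.takeWhile]

lemma pvSkipA : ∀ (mask : List Bool) (k : Nat) (s : Int) (spans : List (List Int)),
    pvOuterA mask s (s + k) spans
      = pvOuterA (mask.drop (k + 1)) (s + k + 1) (s + k) spans := by
  intro mask
  induction mask with
  | nil => intro k s spans; simp [pvOuterA]
  | cons t rest ih =>
    intro k s spans
    have h : s ≤ s + (k : Int) := by omega
    simp only [pvOuterA, if_pos h]
    cases k with
    | zero => simp
    | succ k' =>
      have e1 : s + ((k' + 1 : Nat) : Int) = (s + 1) + (k' : Int) := by push_cast; ring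
      rw [e1, ih k' (s + 1)]
      have e2 : (s + 1) + (k' : Int) + 1 = s + ((k' + 1 : Nat) : Int) + 1 := by push_cast; ring
      rw [e2, ← e1]
      rfl

lemma pvOuterA_runs : ∀ (n : Nat) (mask : List Bool), mask.length ≤ n →
    ∀ (s pe : Int) (spans : List (List Int)), pe < s →
    pvOuterA mask s pe spans = spans ++ (pvRuns mask s).map (fun p => [p.1, p.2]) := by
  intro n
  induction n with
  | zero =>
    intro mask h s pe spans _
    have : mask = [] := List.eq_nil_of_length_eq_zero (Nat.le_zero.mp h)
    subst this; simp [pvOuterA, pvRuns]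
  | succ n ih =>
    intro mask hlen s pe spans hpe
    match mask with
    | [] => simp [pvOuterA, pvRuns]
    | false :: rest =>
      have hc : ¬ (s ≤ pe) := by omega
      simp only [pvOuterA, if_neg hc, Bool.false_eq_true, if_false]
      rw [ih rest (by simpa using Nat.succ_le_succ_iff.mp hlen) (s + 1) pe spans (by omega)]
      simp [pvRuns]
    | true :: rest =>
      have hc : ¬ (s ≤ pe) := by omega
      have hinner := pvInnerA_eq (true :: rest) s 0 pe (((true :: rest).length : Int) - 1)
        (by ring)
      rw [if_neg (by simp)] at hinner
      have htw : (true :: rest).takeWhile (fun b => b) = true :: rest.takeWhile (fun b => b) := by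
        simp [List.takeWhile]
      rw [htw] at hinner
      set kN := (rest.takeWhile (fun b => b)).length with hkN
      have hpe' : pvInnerA (true :: rest) s (((true :: rest).length : Int) - 1) 0 pe
          = (s + 1) + (kN : Int) := by rw [hinner]; simp; ring
      simp only [pvOuterA, if_neg hc]
      rw [hpe']
      rw [pvSkipA rest kN (s + 1) (spans ++ [[s, (s + 1) + (kN : Int)]])]
      have hdw := pvDropWhile_drop rest
      rw [← hkN] at hdw
      cases hrest' : rest.dropWhile (fun b => b) with
      | nil =>
        have hle : rest.length ≤ kN := by
          have := congrArg List.length (hdw.symm.trans hrest')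
          simp [List.length_drop] at this
          omega
        have hdrop : rest.drop (kN + 1) = [] := List.drop_eq_nil_of_le (by omega)
        rw [hdrop]
        simp only [pvOuterA]
        simp only [pvRuns, hrest']
        simp [← hkN]
        ring
      | cons b r2 =>
        have hb : b = false := pvDropWhile_head rest b r2 hrest'
        subst hb
        have hdrop : rest.drop (kN + 1) = r2 := by
          have : rest.drop (kN + 1) = (rest.drop kN).drop 1 := by
            rw [List.drop_drop]
          rw [this, ← hdw, hrest']
          rfl
        rw [hdrop]
        have hlenr2 : r2.length ≤ n := by
          have h1 : (rest.dropWhile (fun b => b)).length ≤ rest.length :=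
            List.length_dropWhile_le _ _
          rw [hrest'] at h1
          simp only [List.length_cons] at h1 hlen
          omega
        rw [ih r2 hlenr2 ((s + 1) + (kN : Int) + 1) ((s + 1) + (kN : Int)) _ (by omega)]
        simp only [pvRuns, hrest', ← hkN]
        have harith : s + (1 + (kN : Int)) = (s + 1) + (kN : Int) := by ring
        rw [harith]
        simp [List.append_assoc]

lemma pvStartsB_pvS : ∀ (mask : List Bool) (prev : Bool) (i : Int),
    (PySem.List.enumerate ((prev :: mask).zip mask) i).filterMap
      (fun p => if p.2.2 && !p.2.1 then some p.1 else none) = pvS mask prev i := by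
  intro mask
  induction mask with
  | nil => intro prev i; simp [pvS]
  | cons c r ih =>
    intro prev i
    have hz : (prev :: c :: r).zip (c :: r) = (prev, c) :: (c :: r).zip r := rfl
    rw [hz, PySem.List.enumerate_cons, List.filterMap_cons]
    by_cases h : (c && !prev) = true
    · simp only [pvS, ih, h]
      simp
    · simp only [pvS]
      rw [if_neg (by simpa using h), if_neg (by simpa using h)]
      simpa using ih c (i + 1)

lemma pvZipHead (c : Bool) (r : List Bool) :
    (c :: r).zip (r ++ [false]) = (c, r.headD false) :: r.zip (r.drop 1 ++ [false]) := by
  cases r <;> rfl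

lemma pvEndsB_pvE : ∀ (mask : List Bool) (i : Int),
    (PySem.List.enumerate (mask.zip (mask.drop 1 ++ [false])) i).filterMap
      (fun p => if p.2.1 && !p.2.2 then some (p.1 + 1) else none) = pvE mask i := by
  intro mask
  induction mask with
  | nil => intro i; simp [pvE]
  | cons c r ih =>
    intro i
    have hz : (c :: r).drop 1 ++ [false] = r ++ [false] := rfl
    rw [hz, pvZipHead, PySem.List.enumerate_cons, List.filterMap_cons]
    by_cases h : (c && !(r.headD false)) = true
    · simp only [pvE]
      rw [if_pos (by simpa using h), if_pos h]
      simpa using ih (i + 1)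
    · simp only [pvE]
      rw [if_neg (by simpa using h), if_neg (by simpa using h)]
      simpa using ih (i + 1)

lemma pvS_skip (r : List Bool) : ∀ (i : Int),
    pvS r true i = pvS (r.dropWhile (fun b => b)) true (i + ((r.takeWhile (fun b => b)).length : Int)) := by
  induction r with
  | nil => intro i; simp [List.takeWhile, List.dropWhile]
  | cons c r2 ih =>
    intro i
    by_cases hc : c = true
    · subst hc
      have h1 : pvS (true :: r2) true i = pvS r2 true (i + 1) := by simp [pvS]
      have h2 : List.takeWhile (fun b => b) (true :: r2)
          = true :: List.takeWhile (fun b => b) r2 := by simp [List.takeWhile]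
      have h3 : List.dropWhile (fun b => b) (true :: r2)
          = List.dropWhile (fun b => b) r2 := by simp [List.dropWhile]
      rw [h1, ih (i + 1), h2, h3]
      congr 1
      simp only [List.length_cons]
      push_cast
      ring
    · have hc' : c = false := by simpa [Bool.not_eq_true] using hc
      subst hc'
      simp [List.dropWhile, List.takeWhile]

lemma pvE_run (r : List Bool) : ∀ (i : Int),
    pvE (true :: r) i
      = (i + 1 + ((r.takeWhile (fun b => b)).length : Int))
        :: pvE (r.dropWhile (fun b => b)) (i + 1 + ((r.takeWhile (fun b => b)).length : Int)) := by
  induction r with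
  | nil => intro i; simp [pvE, List.takeWhile, List.dropWhile]
  | cons d r2 ih =>
    intro i
    by_cases hd : d = true
    · subst hd
      have h1 : pvE (true :: true :: r2) i = pvE (true :: r2) (i + 1) := by
        simp [pvE]
      rw [h1, ih (i + 1)]
      simp only [List.takeWhile, List.dropWhile]
      simp
      constructor
      · ring_nf
      · ring_nf
    · have hd' : d = false := by simpa [Bool.not_eq_true] using hd
      subst hd'
      have h1 : pvE (true :: false :: r2) i = (i + 1) :: pvE (false :: r2) (i + 1) := by
        simp [pvE]
      rw [h1]
      simp [List.takeWhile, List.dropWhile]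

lemma pvZip_runs : ∀ (n : Nat) (mask : List Bool), mask.length ≤ n → ∀ (i : Int),
    (pvS mask false i).zip (pvE mask i) = pvRuns mask i := by
  intro n
  induction n with
  | zero =>
    intro mask h i
    have : mask = [] := List.eq_nil_of_length_eq_zero (Nat.le_zero.mp h)
    subst this; simp [pvS, pvE, pvRuns_nil]
  | succ n ih =>
    intro mask hlen i
    match mask with
    | [] => simp [pvS, pvE, pvRuns_nil]
    | false :: r =>
      have h1 : pvS (false :: r) false i = pvS r false (i + 1) := by simp [pvS]
      have h2 : pvE (false :: r) i = pvE r (i + 1) := by simp [pvE]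
      rw [h1, h2, ih r (by simpa using Nat.succ_le_succ_iff.mp hlen) (i + 1)]
      rw [pvRuns_false]
    | true :: r =>
      set kN := (r.takeWhile (fun b => b)).length with hkN
      have h1 : pvS (true :: r) false i = i :: pvS r true (i + 1) := by simp [pvS]
      rw [h1, pvE_run r i, List.zip_cons_cons]
      rw [pvS_skip r (i + 1)]
      cases hrest' : r.dropWhile (fun b => b) with
      | nil =>
        rw [pvRuns_true, hrest', pvRuns_nil, ← hkN]
        have e1 : i + (1 + (kN : Int)) = i + 1 + (kN : Int) := by ring
        rw [e1]
        simp [pvS, pvE]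
      | cons b r2 =>
        have hb : b = false := pvDropWhile_head r b r2 hrest'
        subst hb
        have hS : pvS (false :: r2) true (i + 1 + (kN : Int)) = pvS r2 false (i + 1 + (kN : Int) + 1) := by
          simp [pvS]
        have hE : pvE (false :: r2) (i + 1 + (kN : Int)) = pvE r2 (i + 1 + (kN : Int) + 1) := by
          simp [pvE]
        have hlenr2 : r2.length ≤ n := by
          have hle : (r.dropWhile (fun b => b)).length ≤ r.length := List.length_dropWhile_le _ _
          rw [hrest'] at hle
          simp only [List.length_cons] at hle hlen
          omega
        rw [hS, hE, ih r2 hlenr2 (i + 1 + (kN : Int) + 1)]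
        rw [pvRuns_true, hrest', pvRuns_false, ← hkN]
        have e1 : i + (1 + (kN : Int)) = i + 1 + (kN : Int) := by ring
        rw [e1]

-- ===== VERDICT (by name: the statement is the Claim_ definition above) =====
theorem get_hashtag_spans_spec : Claim_equal_get_hashtag_spans := by
  unfold Claim_equal_get_hashtag_spans
  intro tokens _
  unfold Spec_get_hashtag_spans
  show get_hashtag_spans tokens
      = ((pvStartsB (tokens.map pvIsPart)).zip (pvEndsB (tokens.map pvIsPart))).map
          (fun p => [p.1, p.2])
  unfold get_hashtag_spans
  set mask := tokens.map pvIsPart with hmask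
  rw [pvOuterA_runs mask.length mask le_rfl 0 (-1) [] (by omega)]
  unfold pvStartsB pvEndsB
  rw [PySem.List.slice_from_one, ← List.drop_one]
  rw [pvStartsB_pvS mask false 0, pvEndsB_pvE mask 0]
  rw [pvZip_runs mask.length mask le_rfl 0]
  simp
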